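-- pv_equiv track=rewrite | github.com/ukdeepak-33/powerballproplay | api/Index.py | _find_consecutive_sequences
-- ===== SOURCE A (Python) =====
-- def _find_consecutive_sequences(numbers_list):
--     """Identifies consecutive sequences in a list of numbers."""
--     sequences = []
--     if not numbers_list:
--         return sequences
--
--     sorted_nums = sorted(list(set(numbers_list)))
--     if not sorted_nums:
--         return sequences
--
--     current_sequence = [sorted_nums[0]]
--     for i in range(1, len(sorted_nums)):
--         if sorted_nums[i] == current_sequence[-1] + 1:
--             current_sequence.append(sorted_nums[i])
--         else:
--             if len(current_sequence) >= 2: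
--                 sequences.append(current_sequence)
--             current_sequence = [sorted_nums[i]]
--
--     if len(current_sequence) >= 2:
--         sequences.append(current_sequence)
--
--     return sequences
-- ===== SOURCE B (Python) =====
-- def _find_consecutive_sequences(numbers_list):
--     """Set-based run detection: each number without a predecessor in the set
--     starts a run; walk forward through the set to collect it."""
--     s = set(numbers_list)
--     sequences = []
--     for start in sorted(x for x in s if x - 1 not in s):
--         run = [start]
--         while run[-1] + 1 in s:
--             run.append(run[-1] + 1)
--         if len(run) >= 2:
--             sequences.append(run)
--     return sequences
-- ===== Notes on version B (the rewrite author's own statement) =====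
-- stated objective: alternative
-- what changed: Replaces the sort-dedup-then-linear-scan state machine by set-based run detection: every number whose predecessor is absent from the set starts a run, which is walked forward via membership tests; run starts are sorted to reproduce A's ordering.
import Mathlib
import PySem

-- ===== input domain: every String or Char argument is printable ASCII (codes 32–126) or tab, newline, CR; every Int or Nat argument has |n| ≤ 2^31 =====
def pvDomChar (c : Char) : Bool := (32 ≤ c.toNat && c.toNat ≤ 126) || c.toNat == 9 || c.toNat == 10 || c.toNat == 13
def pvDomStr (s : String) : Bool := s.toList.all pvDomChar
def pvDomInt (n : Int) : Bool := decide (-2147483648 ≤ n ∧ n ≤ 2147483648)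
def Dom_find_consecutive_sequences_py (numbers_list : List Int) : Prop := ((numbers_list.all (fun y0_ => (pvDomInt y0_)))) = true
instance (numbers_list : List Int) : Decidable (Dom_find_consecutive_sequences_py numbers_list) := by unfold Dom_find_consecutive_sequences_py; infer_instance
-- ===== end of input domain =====

-- B replaces A's sort-dedup-then-scan state machine by set-based run detection
-- (runs start at numbers whose predecessor is absent from the set); return values proved equal.

-- ===== PORT A =====
-- loop 'for i in range(1, len(sorted_nums))' ported as structural recursion over the tail of
-- sorted_nums; 'current_sequence[-1]' is ported as getLast?.getD 0 (current_sequence is never empty).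
def pvALoop : List Int → List Int → List (List Int) → (List (List Int)) × List Int
  | [], cur, seqs => (seqs, cur)
  | x :: rest, cur, seqs =>
      if x = cur.getLast?.getD 0 + 1 then
        pvALoop rest (cur ++ [x]) seqs
      else
        pvALoop rest [x] (if 2 ≤ cur.length then seqs ++ [cur] else seqs)

def find_consecutive_sequences_py (numbers_list : List Int) : List (List Int) :=
  if numbers_list = [] then []
  else
    let sorted_nums := PySem.List.sorted (PySem.Set.ofList numbers_list) (fun x => x) false
    match sorted_nums with
    | [] => []
    | x0 :: rest =>
        let p := pvALoop rest [x0] []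
        if 2 ≤ p.2.length then p.1 ++ [p.2] else p.1

-- ===== PORT B =====
-- the 'while run[-1] + 1 in s' loop of Source B, with fuel s.length (the run only collects
-- distinct elements of s beyond its start, so membership fails before the fuel runs out);
-- 'run[-1]' is ported as getLast?.getD 0 (run is never empty).
def pvWalk (s : List Int) : Nat → List Int → List Int
  | 0, run => run
  | fuel + 1, run =>
      if PySem.Set.contains s (run.getLast?.getD 0 + 1) then
        pvWalk s fuel (run ++ [run.getLast?.getD 0 + 1])
      else run

def find_consecutive_sequences_py_alt (numbers_list : List Int) : List (List Int) :=
  let s : PySem.Set Int := PySem.Set.ofList numbers_list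
  let starts := PySem.List.sorted (s.filter (fun x => !(PySem.Set.contains s (x - 1)))) (fun x => x) false
  starts.foldl (fun sequences start =>
      let run := pvWalk s s.length [start]
      if 2 ≤ run.length then sequences ++ [run] else sequences) []

-- ===== PRECONDITION & SPEC =====
def Spec_find_consecutive_sequences_py (numbers_list : List Int) (out : List (List Int)) : Prop := out = find_consecutive_sequences_py_alt numbers_list
instance (numbers_list : List Int) (out : List (List Int)) : Decidable (Spec_find_consecutive_sequences_py numbers_list out) := by unfold Spec_find_consecutive_sequences_py; infer_instance

-- ===== CLAIM (what is proved, stated in full; the proofs are below) =====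
def Claim_equal_find_consecutive_sequences_py : Prop := ∀ (numbers_list : List Int), Dom_find_consecutive_sequences_py numbers_list → Spec_find_consecutive_sequences_py numbers_list (find_consecutive_sequences_py numbers_list)

-- ===== LEMMAS AND PROOFS =====

-- last-element helpers ------------------------------------------------------
lemma pvLastD_cons (a d : Int) (l : List Int) :
    (a :: l).getLast?.getD d = l.getLast?.getD a := by
  cases l with
  | nil => rfl
  | cons b t =>
      rw [List.getLast?_cons_cons]
      rw [List.getLast?_eq_some_getLast (l := b :: t) (by simp)]
      rfl

lemma pvLastD_append (l : List Int) (a d : Int) :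
    (l ++ [a]).getLast?.getD d = a := by
  simp

lemma pvLastD_mem (a d : Int) (l : List Int) :
    (a :: l).getLast?.getD d ∈ a :: l := by
  induction l generalizing a with
  | nil => simp
  | cons b t ih =>
      rw [pvLastD_cons, pvLastD_cons]
      have h := ih b
      rw [pvLastD_cons] at h
      exact List.mem_cons_of_mem a h

-- reference decomposition of a strictly increasing list into maximal runs ----
def pvTakeRun : Int → List Int → List Int × List Int
  | _, [] => ([], [])
  | x, y :: ys =>
      if y = x + 1 then (y :: (pvTakeRun y ys).1, (pvTakeRun y ys).2)
      else ([], y :: ys)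

lemma pvTakeRun_append (x : Int) (xs : List Int) :
    (pvTakeRun x xs).1 ++ (pvTakeRun x xs).2 = xs := by
  induction xs generalizing x with
  | nil => simp [pvTakeRun]
  | cons y ys ih =>
      by_cases h : y = x + 1
      · subst h; simp [pvTakeRun, ih (x + 1)]
      · simp [pvTakeRun, h]

lemma pvTakeRun_snd_length (x : Int) (xs : List Int) :
    (pvTakeRun x xs).2.length ≤ xs.length := by
  induction xs generalizing x with
  | nil => simp [pvTakeRun]
  | cons y ys ih =>
      by_cases h : y = x + 1
      · simp only [pvTakeRun, if_pos h]
        exact le_trans (ih y) (by simp)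
      · simp [pvTakeRun, h]

lemma pvTakeRun_mem (x : Int) (xs : List Int) :
    ∀ y ∈ (pvTakeRun x xs).1, y - 1 = x ∨ y - 1 ∈ (pvTakeRun x xs).1 := by
  induction xs generalizing x with
  | nil => simp [pvTakeRun]
  | cons y ys ih =>
      by_cases h : y = x + 1
      · simp only [pvTakeRun, if_pos h]
        intro z hz
        rcases List.mem_cons.mp hz with hz | hz
        · left; omega
        · rcases ih y z hz with hz' | hz'
          · right; simp [hz']
          · right; exact List.mem_cons_of_mem _ hz'
      · simp [pvTakeRun, h]

lemma pvTakeRun_stop (x r0 : Int) (xs rest' : List Int)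
    (h : (pvTakeRun x xs).2 = r0 :: rest') :
    r0 ≠ (pvTakeRun x xs).1.getLast?.getD x + 1 := by
  induction xs generalizing x r0 rest' with
  | nil => simp [pvTakeRun] at h
  | cons y ys ih =>
      by_cases hy : y = x + 1
      · simp only [pvTakeRun, if_pos hy] at h ⊢
        rw [pvLastD_cons]
        exact ih y r0 rest' h
      · simp only [pvTakeRun, if_neg hy] at h ⊢
        simp only [List.cons.injEq] at h
        simpa [← h.1] using hy

def pvRuns : List Int → List (List Int)
  | [] => []
  | x :: xs => (x :: (pvTakeRun x xs).1) :: pvRuns (pvTakeRun x xs).2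
termination_by l => l.length
decreasing_by
  have := pvTakeRun_snd_length x xs
  simp; omega

-- the maximal chain a walk of B collects -------------------------------------
def pvChain (s : List Int) : Nat → Int → List Int
  | 0, _ => []
  | fuel + 1, w =>
      if PySem.Set.contains s w then w :: pvChain s fuel (w + 1) else []

def pvChainMax (s : List Int) (w : Int) : List Int :=
  pvChain s ((s.filter (fun y => decide (w ≤ y))).length) w

lemma pvChain_neg (s : List Int) (f : Nat) (w : Int) (h : w ∉ s) :
    pvChain s f w = [] := by
  cases f with
  | zero => rfl
  | succ f' =>
      simp [pvChain, h]

lemma pvFilter_succ_lt (s : List Int) (w : Int) (hn : s.Nodup) (hw : w ∈ s) :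
    (s.filter (fun y => decide (w + 1 ≤ y))).length
      < (s.filter (fun y => decide (w ≤ y))).length := by
  induction s with
  | nil => simp at hw
  | cons a t ih =>
      have hsub : (t.filter (fun y => decide (w + 1 ≤ y))).length
          ≤ (t.filter (fun y => decide (w ≤ y))).length :=
        (List.monotone_filter_right t (by intro z hz; simp at hz ⊢; omega)).length_le
      rw [List.nodup_cons] at hn
      rcases List.mem_cons.mp hw with heq | hw'
      · subst heq
        simp only [List.filter_cons]
        have h1 : ¬ (w + 1 ≤ w) := by omega
        simp only [decide_eq_false h1, decide_eq_true (le_refl w), Bool.false_eq_true,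
          if_false, if_true, List.length_cons]
        omega
      · have hlt := ih hn.2 hw'
        simp only [List.filter_cons]
        by_cases h1 : w + 1 ≤ a
        · have h2 : w ≤ a := by omega
          simp only [decide_eq_true h1, decide_eq_true h2, if_true, List.length_cons]
          omega
        · by_cases h2 : w ≤ a
          · simp only [decide_eq_false h1, decide_eq_true h2, Bool.false_eq_true,
              if_false, if_true, List.length_cons]
            omega
          · simp only [decide_eq_false h1, decide_eq_false h2, Bool.false_eq_true,
              if_false]
            omega

lemma pvChain_congr_fuel (s : List Int) (hn : s.Nodup) :
    ∀ (f1 f2 : Nat) (w : Int),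
      (s.filter (fun y => decide (w ≤ y))).length ≤ f1 →
      (s.filter (fun y => decide (w ≤ y))).length ≤ f2 →
      pvChain s f1 w = pvChain s f2 w := by
  intro f1
  induction f1 with
  | zero =>
      intro f2 w h1 h2
      have hw : w ∉ s := by
        intro hw
        have : w ∈ s.filter (fun y => decide (w ≤ y)) :=
          List.mem_filter.mpr ⟨hw, by simp⟩
        have := List.length_pos_of_mem this
        omega
      rw [pvChain_neg s 0 w hw, pvChain_neg s f2 w hw]
  | succ f1' ih =>
      intro f2 w h1 h2
      by_cases hw : w ∈ s
      · have hlt := pvFilter_succ_lt s w hn hw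
        have hmemf : w ∈ s.filter (fun y => decide (w ≤ y)) :=
          List.mem_filter.mpr ⟨hw, by simp⟩
        have hpos := List.length_pos_of_mem hmemf
        cases f2 with
        | zero => omega
        | succ f2' =>
            have hc : PySem.Set.contains s w = true := (PySem.Set.contains_iff s w).mpr hw
            simp only [pvChain, hc, if_true]
            rw [ih f2' (w + 1) (by omega) (by omega)]
      · rw [pvChain_neg s _ w hw, pvChain_neg s f2 w hw]

lemma pvChainMax_pos (s : List Int) (w : Int) (hn : s.Nodup) (hw : w ∈ s) :
    pvChainMax s w = w :: pvChainMax s (w + 1) := by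
  unfold pvChainMax
  have hmemf : w ∈ s.filter (fun y => decide (w ≤ y)) :=
    List.mem_filter.mpr ⟨hw, by simp⟩
  have hpos := List.length_pos_of_mem hmemf
  have hlt := pvFilter_succ_lt s w hn hw
  obtain ⟨k, hk⟩ : ∃ k, (s.filter (fun y => decide (w ≤ y))).length = k + 1 :=
    ⟨(s.filter (fun y => decide (w ≤ y))).length - 1, by omega⟩
  rw [hk]
  have hc : PySem.Set.contains s w = true := (PySem.Set.contains_iff s w).mpr hw
  simp only [pvChain, hc, if_true]
  rw [pvChain_congr_fuel s hn k ((s.filter (fun y => decide (w + 1 ≤ y))).length) (w + 1)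
        (by omega) (le_refl _)]

lemma pvChainMax_neg (s : List Int) (w : Int) (h : w ∉ s) :
    pvChainMax s w = [] := by
  exact pvChain_neg s _ w h

lemma pvWalk_eq_chain (s : List Int) :
    ∀ (fuel : Nat) (run : List Int) (v : Int), run.getLast?.getD 0 = v →
      pvWalk s fuel run = run ++ pvChain s fuel (v + 1) := by
  intro fuel
  induction fuel with
  | zero => intro run v hv; simp [pvWalk, pvChain]
  | succ f ih =>
      intro run v hv
      simp only [pvWalk, pvChain, hv]
      cases hc : PySem.Set.contains s (v + 1) with
      | true =>
          simp only [if_true]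
          rw [ih (run ++ [v + 1]) (v + 1) (pvLastD_append run (v + 1) 0)]
          simp
      | false => simp

lemma pvWalk_start (s : List Int) (hn : s.Nodup) (x : Int) :
    pvWalk s s.length [x] = x :: pvChainMax s (x + 1) := by
  rw [pvWalk_eq_chain s s.length [x] x rfl]
  unfold pvChainMax
  rw [pvChain_congr_fuel s hn s.length ((s.filter (fun y => decide (x + 1 ≤ y))).length)
        (x + 1) (le_trans (List.length_filter_le _ _) (le_refl _)) (le_refl _)]
  rfl

-- the crux: the run A's scan takes off a strictly increasing list is exactly the chain
-- B walks through the set, and membership above the run's last element is unchanged.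
lemma pvTakeRun_chain (s : List Int) (hn : s.Nodup) :
    ∀ (xs : List Int) (x : Int),
      (x :: xs).Pairwise (· < ·) →
      (∀ y, x < y → (y ∈ s ↔ y ∈ x :: xs)) →
      (pvTakeRun x xs).1 = pvChainMax s (x + 1) ∧
      (∀ y, (pvTakeRun x xs).1.getLast?.getD x < y → (y ∈ s ↔ y ∈ (pvTakeRun x xs).2)) := by
  intro xs
  induction xs with
  | nil =>
      intro x hp hm
      constructor
      · have hns : x + 1 ∉ s := by
          intro hx
          have := (hm (x + 1) (by omega)).mp hx
          simp at this
        simp [pvTakeRun, pvChainMax_neg s (x + 1) hns]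
      · intro y hy
        simp only [pvTakeRun] at hy ⊢
        simp only [List.getLast?_nil, Option.getD_none] at hy
        rw [hm y hy]
        constructor
        · intro h; simp at h; omega
        · intro h; simp at h
  | cons y ys ih =>
      intro x hp hm
      rw [List.pairwise_cons] at hp
      have hxy : x < y := hp.1 y (by simp)
      by_cases hy : y = x + 1
      · have hp' : (y :: ys).Pairwise (· < ·) := hp.2
        have hm' : ∀ z, y < z → (z ∈ s ↔ z ∈ y :: ys) := by
          intro z hz
          rw [hm z (by omega)]
          simp only [List.mem_cons]
          constructor
          · rintro (h | h)
            · omega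
            · exact h
          · intro h
            exact Or.inr h
        obtain ⟨h1, h2⟩ := ih y hp' hm'
        have hys : y ∈ s := (hm y hxy).mpr (by simp)
        constructor
        · simp only [pvTakeRun, if_pos hy]
          rw [← hy, pvChainMax_pos s y hn hys, h1, hy]
        · intro z hz
          simp only [pvTakeRun, if_pos hy] at hz ⊢
          rw [pvLastD_cons] at hz
          exact h2 z hz
      · have hyy : x + 1 < y := by omega
        constructor
        · have hns : x + 1 ∉ s := by
            intro hx
            have := (hm (x + 1) (by omega)).mp hx
            simp only [List.mem_cons] at this
            rcases this with h | h | h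
            · omega
            · omega
            · have := hp.2
              rw [List.pairwise_cons] at this
              have := this.1 (x + 1) h
              omega
          simp [pvTakeRun, hy, pvChainMax_neg s (x + 1) hns]
        · intro z hz
          simp only [pvTakeRun, if_neg hy] at hz ⊢
          simp only [List.getLast?_nil, Option.getD_none] at hz
          rw [hm z hz]
          simp only [List.mem_cons]
          constructor
          · rintro (h | h)
            · omega
            · exact h
          · intro h
            exact Or.inr h


-- A-side characterisation ----------------------------------------------------
lemma pvALoop_spec :
    ∀ (xs cur : List Int) (seqs : List (List Int)),
      (if 2 ≤ (pvALoop xs cur seqs).2.length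
        then (pvALoop xs cur seqs).1 ++ [(pvALoop xs cur seqs).2]
        else (pvALoop xs cur seqs).1)
      = seqs ++ (((cur ++ (pvTakeRun (cur.getLast?.getD 0) xs).1)
                    :: pvRuns (pvTakeRun (cur.getLast?.getD 0) xs).2).filter
                  (fun r => decide (2 ≤ r.length))) := by
  intro xs
  induction xs with
  | nil =>
      intro cur seqs
      simp only [pvALoop, pvTakeRun, pvRuns, List.append_nil, List.filter]
      by_cases h : 2 ≤ cur.length
      · simp [h]
      · simp [h]
  | cons x rest ih =>
      intro cur seqs
      simp only [pvALoop]
      by_cases hx : x = cur.getLast?.getD 0 + 1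
      · rw [if_pos hx]
        have h := ih (cur ++ [x]) seqs
        rw [pvLastD_append cur x 0] at h
        rw [h]
        simp only [pvTakeRun, if_pos hx]
        simp [List.append_assoc]
      · rw [if_neg hx]
        have h := ih [x] (if 2 ≤ cur.length then seqs ++ [cur] else seqs)
        have hgd : ([x] : List Int).getLast?.getD 0 = x := rfl
        rw [hgd] at h
        rw [h]
        simp only [pvTakeRun, if_neg hx]
        rw [show pvRuns (x :: rest)
              = (x :: (pvTakeRun x rest).1) :: pvRuns (pvTakeRun x rest).2 from by
            rw [pvRuns]]
        simp only [List.append_nil, List.filter_cons]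
        by_cases hc : 2 ≤ cur.length
        · simp only [decide_eq_true hc, if_pos hc, if_true, List.append_assoc,
            List.singleton_append]
          rfl
        · simp only [decide_eq_false hc, if_neg hc, Bool.false_eq_true, if_false]
          rfl

lemma pvA_eq_runs (nl : List Int) :
    find_consecutive_sequences_py nl
      = (pvRuns (PySem.List.sorted (PySem.Set.ofList nl) (fun x => x) false)).filter
          (fun r => decide (2 ≤ r.length)) := by
  by_cases hnl : nl = []
  · subst hnl
    simp [find_consecutive_sequences_py, PySem.List.sorted, pvRuns]
  · unfold find_consecutive_sequences_py
    rw [if_neg hnl]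
    cases hL : PySem.List.sorted (PySem.Set.ofList nl) (fun x => x) false with
    | nil => simp [pvRuns]
    | cons x0 rest =>
        simp only
        have h := pvALoop_spec rest [x0] []
        have hgd : ([x0] : List Int).getLast?.getD 0 = x0 := rfl
        rw [hgd] at h
        rw [h]
        rw [show pvRuns (x0 :: rest)
              = (x0 :: (pvTakeRun x0 rest).1) :: pvRuns (pvTakeRun x0 rest).2 from by
            rw [pvRuns]]
        simp

-- B-side characterisation ----------------------------------------------------
lemma pvMain (s : List Int) (hn : s.Nodup) :
    ∀ (n : Nat) (xs : List Int) (x : Int) (seqs : List (List Int)),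
      xs.length ≤ n →
      (x :: xs).Pairwise (· < ·) →
      x ∈ s → (x - 1) ∉ s →
      (∀ y, x < y → (y ∈ s ↔ y ∈ x :: xs)) →
      ((x :: xs).filter (fun y => !(PySem.Set.contains s (y - 1)))).foldl
        (fun sequences start =>
          let run := pvWalk s s.length [start]
          if 2 ≤ run.length then sequences ++ [run] else sequences) seqs
      = seqs ++ (pvRuns (x :: xs)).filter (fun r => decide (2 ≤ r.length)) := by
  intro n
  induction n with
  | zero =>
      intro xs x seqs hlen hp hxs hx1 hm
      have hxs0 : xs = [] := List.eq_nil_of_length_eq_zero (by omega)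
      subst hxs0
      have hcx : (!PySem.Set.contains s (x - 1)) = true := by
        simp only [Bool.not_eq_eq_eq_not, Bool.not_true]
        rw [Bool.eq_false_iff]
        intro hcc
        exact hx1 ((PySem.Set.contains_iff s (x - 1)).mp hcc)
      have hns : x + 1 ∉ s := by
        intro h
        have := (hm (x + 1) (by omega)).mp h
        simp at this
      have hrun : pvWalk s s.length [x] = [x] := by
        rw [pvWalk_start s hn, pvChainMax_neg s (x + 1) hns]
      simp [hrun, pvRuns, pvTakeRun, hx1]
  | succ n ihn =>
      intro xs x seqs hlen hp hxs hx1 hm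
      obtain ⟨h1, h2⟩ := pvTakeRun_chain s hn xs x hp hm
      have hxr := pvTakeRun_append x xs
      have hxall : ∀ z ∈ xs, x < z := (List.pairwise_cons.mp hp).1
      have hpxs : xs.Pairwise (· < ·) := (List.pairwise_cons.mp hp).2
      have hmem_xs : ∀ z ∈ xs, z ∈ s := fun z hz =>
        (hm z (hxall z hz)).mpr (List.mem_cons_of_mem x hz)
      have hcx : (!PySem.Set.contains s (x - 1)) = true := by
        simp only [Bool.not_eq_eq_eq_not, Bool.not_true]
        rw [Bool.eq_false_iff]
        intro hcc
        exact hx1 ((PySem.Set.contains_iff s (x - 1)).mp hcc)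
      have hfr : (pvTakeRun x xs).1.filter (fun y => !(PySem.Set.contains s (y - 1))) = [] := by
        rw [List.filter_eq_nil_iff]
        intro z hz
        have hz1 : z - 1 ∈ s := by
          rcases pvTakeRun_mem x xs z hz with h | h
          · rw [h]; exact hxs
          · exact hmem_xs _ (by rw [← hxr]; exact List.mem_append_left _ h)
        simpa using hz1
      have hrun : pvWalk s s.length [x] = x :: (pvTakeRun x xs).1 := by
        rw [pvWalk_start s hn, ← h1]
      have hfilter : (x :: xs).filter (fun y => !(PySem.Set.contains s (y - 1)))
          = x :: ((pvTakeRun x xs).2.filter (fun y => !(PySem.Set.contains s (y - 1)))) := by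
        rw [List.filter_cons, if_pos hcx]
        congr 1
        conv_lhs => rw [← hxr]
        rw [List.filter_append, hfr, List.nil_append]
      rw [hfilter, List.foldl_cons]
      have hstep : (let run := pvWalk s s.length [x]
            if 2 ≤ run.length then seqs ++ [run] else seqs)
          = seqs ++ List.filter (fun r => decide (2 ≤ r.length)) [x :: (pvTakeRun x xs).1] := by
        show (if 2 ≤ (pvWalk s s.length [x]).length
                then seqs ++ [pvWalk s s.length [x]] else seqs) = _
        rw [hrun]
        by_cases hcl : 2 ≤ (x :: (pvTakeRun x xs).1).length
        · have h1l : 1 ≤ (pvTakeRun x xs).1.length := by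
            simp only [List.length_cons] at hcl; omega
          simp [h1l]
        · have h1l : ¬ 1 ≤ (pvTakeRun x xs).1.length := by
            simp only [List.length_cons] at hcl ⊢; omega
          simp [h1l]
      rw [hstep]
      rw [show pvRuns (x :: xs)
            = (x :: (pvTakeRun x xs).1) :: pvRuns (pvTakeRun x xs).2 from by rw [pvRuns]]
      cases hrest : (pvTakeRun x xs).2 with
      | nil =>
          simp only [List.filter_nil, List.foldl_nil, pvRuns, List.filter_cons]
      | cons r0 rest' =>
          have hrest_len := pvTakeRun_snd_length x xs
          rw [hrest] at hrest_len
          have hlen' : rest'.length ≤ n := by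
            simp only [List.length_cons] at hrest_len
            omega
          have hrest_sub : (pvTakeRun x xs).2.Sublist xs := by
            conv_rhs => rw [← hxr]
            exact List.sublist_append_right _ _
          have hp' : (r0 :: rest').Pairwise (· < ·) := by
            rw [← hrest]
            exact hpxs.sublist hrest_sub
          have hr0_xs : r0 ∈ xs := hrest_sub.mem (by rw [hrest]; simp)
          have hxr0 : x < r0 := hxall r0 hr0_xs
          have hr0s : r0 ∈ s := hmem_xs r0 hr0_xs
          have hlst_mem : (pvTakeRun x xs).1.getLast?.getD x ∈ x :: (pvTakeRun x xs).1 := by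
            have := pvLastD_mem x 0 (pvTakeRun x xs).1
            rwa [pvLastD_cons] at this
          have hlst_lt : (pvTakeRun x xs).1.getLast?.getD x < r0 := by
            rcases List.mem_cons.mp hlst_mem with heq | hmem
            · rw [heq]; exact hxr0
            · have hxs_pair : ((pvTakeRun x xs).1 ++ (pvTakeRun x xs).2).Pairwise (· < ·) := by
                rw [pvTakeRun_append]; exact hpxs
              have hpall := (List.pairwise_append.mp hxs_pair).2.2
              exact hpall _ hmem r0 (by rw [hrest]; simp)
          have hstop : r0 ≠ (pvTakeRun x xs).1.getLast?.getD x + 1 :=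
            pvTakeRun_stop x r0 xs rest' hrest
          have hall_rest' : ∀ z ∈ rest', r0 < z := (List.pairwise_cons.mp hp').1
          have hr0_1 : r0 - 1 ∉ s := by
            intro hmem
            have := (h2 (r0 - 1) (by omega)).mp hmem
            rw [hrest] at this
            rcases List.mem_cons.mp this with heq | hmem'
            · omega
            · have := hall_rest' _ hmem'
              omega
          have hm' : ∀ z, r0 < z → (z ∈ s ↔ z ∈ r0 :: rest') := by
            intro z hz
            rw [h2 z (by omega), hrest]
          rw [ihn rest' r0 (seqs ++ List.filter (fun r => decide (2 ≤ r.length))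
                [x :: (pvTakeRun x xs).1]) hlen' hp' hr0s hr0_1 hm']
          rw [List.filter_cons]
          by_cases h1l : 1 ≤ (pvTakeRun x xs).1.length
          · simp [h1l]
          · simp [h1l]

lemma pvB_eq_runs (nl : List Int) :
    find_consecutive_sequences_py_alt nl
      = (pvRuns (PySem.List.sorted (PySem.Set.ofList nl) (fun x => x) false)).filter
          (fun r => decide (2 ≤ r.length)) := by
  unfold find_consecutive_sequences_py_alt
  dsimp only
  have hnodup : (PySem.Set.ofList nl).Nodup := PySem.Set.nodup_ofList nl
  have hperm : (PySem.List.sorted (PySem.Set.ofList nl) (fun x => x) false).Perm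
      (PySem.Set.ofList nl) := PySem.List.sorted_perm _ _ _
  have hLp : (PySem.List.sorted (PySem.Set.ofList nl) (fun x => x) false).Pairwise (· < ·) :=
    PySem.List.sorted_ofList_pairwise_lt nl
  have hmemL : ∀ y, y ∈ PySem.Set.ofList nl
      ↔ y ∈ PySem.List.sorted (PySem.Set.ofList nl) (fun x => x) false :=
    fun y => (hperm.mem_iff).symm
  have hstarts : PySem.List.sorted
        ((PySem.Set.ofList nl).filter (fun x => !(PySem.Set.contains (PySem.Set.ofList nl) (x - 1))))
        (fun x => x) false
      = (PySem.List.sorted (PySem.Set.ofList nl) (fun x => x) false).filter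
          (fun x => !(PySem.Set.contains (PySem.Set.ofList nl) (x - 1))) :=
    PySem.List.sorted_eq_of_perm_of_pairwise_lt _ _ _ (hperm.filter _) (hLp.filter _)
  cases hL : PySem.List.sorted (PySem.Set.ofList nl) (fun x => x) false with
  | nil =>
      rw [hstarts, hL]
      simp [pvRuns]
  | cons x xs =>
      have hxL : x ∈ PySem.Set.ofList nl := (hmemL x).mpr (by rw [hL]; simp)
      have hxmin : ∀ z ∈ xs, x < z := by
        have := hLp
        rw [hL, List.pairwise_cons] at this
        exact this.1
      have hx1 : x - 1 ∉ PySem.Set.ofList nl := by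
        intro h
        have := (hmemL (x - 1)).mp h
        rw [hL] at this
        rcases List.mem_cons.mp this with heq | hmem
        · omega
        · have := hxmin _ hmem
          omega
      have hm : ∀ y, x < y → (y ∈ PySem.Set.ofList nl ↔ y ∈ x :: xs) := by
        intro y _
        rw [hmemL y, hL]
      rw [hstarts, hL]
      rw [pvMain (PySem.Set.ofList nl) hnodup xs.length xs x [] (le_refl _)
            (by rw [← hL]; exact hLp) hxL hx1 hm]
      simp

-- ===== VERDICT (by name: the statement is the Claim_ definition above) =====
theorem find_consecutive_sequences_py_spec : Claim_equal_find_consecutive_sequences_py := by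
  intro nl _
  unfold Spec_find_consecutive_sequences_py
  rw [pvA_eq_runs, pvB_eq_runs]
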